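-- pv_equiv track=rewrite | github.com/mikecitt/LawResolver | extractor/extractor.py | get_full_names
-- ===== SOURCE A (Python) =====
-- def get_full_names(text: str):
--     full_names = []
--     full_name = []
--     for word in text.split():
--         if word[0].isupper():
--             full_name.append(word)
--         elif len(full_name) != 0:
--             full_names.append(' '.join(full_name).replace(',', ''))
--             full_name = []
--
--     if len(full_name) != 0:
--         full_names.append(' '.join(full_name).replace(',', ''))
--     return full_names
-- ===== SOURCE B (Python) =====
-- def get_full_names(text: str):
--     # Run-extraction: repeatedly take the leading run of capitalized words,
--     # emit it as one name, and continue after it.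
--     result = []
--     words = text.split()
--     while words:
--         run = []
--         for w in words:
--             if w[0].isupper():
--                 run.append(w)
--             else:
--                 break
--         if run:
--             result.append(' '.join(run).replace(',', ''))
--             words = words[len(run):]
--         else:
--             words = words[1:]
--     return result
-- ===== Notes on version B (the rewrite author's own statement) =====
-- stated objective: alternative
-- what changed: Replaced the accumulator-and-flush state machine with a run-extraction loop that repeatedly takes the leading run of capitalized words, emits it, and drops it (skipping one word when no run starts).
import Mathlib
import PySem

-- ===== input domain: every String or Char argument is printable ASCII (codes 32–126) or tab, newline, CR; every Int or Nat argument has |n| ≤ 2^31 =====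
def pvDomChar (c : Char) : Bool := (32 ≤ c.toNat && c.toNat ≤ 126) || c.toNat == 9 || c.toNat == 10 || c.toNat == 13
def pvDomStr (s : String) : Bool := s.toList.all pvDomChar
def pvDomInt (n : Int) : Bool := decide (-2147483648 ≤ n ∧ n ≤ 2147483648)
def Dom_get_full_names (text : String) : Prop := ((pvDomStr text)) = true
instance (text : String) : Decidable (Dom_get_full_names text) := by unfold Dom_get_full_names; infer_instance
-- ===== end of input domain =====

-- B replaces A's accumulator-and-flush state machine with a run-extraction loop (alternative decomposition, same cost).

-- shared one-liners (both Pythons write exactly 'w[0].isupper()' and "' '.join(g).replace(',', '')")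
-- word[0] on an empty word would raise IndexError in Python; words from split() are never empty, so the none branch is unreachable
def pvHeadUpper (w : String) : Bool :=
  match PySem.Str.pyGet? w 0 with
  | some c => PySem.Chars.isupper c
  | none => false

def pvJoinName (g : List String) : String :=
  PySem.Str.replace (PySem.Str.join " " g) "," ""

-- ===== PORT A =====
def get_full_names (text : String) : List String :=
  let step := fun (st : List String × List String) (word : String) =>
    if pvHeadUpper word then (st.1, st.2 ++ [word])
    else if st.2.length ≠ 0 then (st.1 ++ [pvJoinName st.2], ([] : List String))
    else st
  let r := (PySem.Str.split₀ text).foldl step ([], [])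
  if r.2.length ≠ 0 then r.1 ++ [pvJoinName r.2] else r.1

-- ===== PORT B =====
-- B's inner for-with-break computes the leading run of capitalized words (= takeWhile);
-- words[len(run):] with len(run) ≥ 0 is List.drop.
def pvRuns : List String → List String
  | [] => []
  | w :: ws =>
    let run := (w :: ws).takeWhile pvHeadUpper
    if h : run = [] then pvRuns ws
    else pvJoinName run :: pvRuns ((w :: ws).drop run.length)
termination_by l => l.length
decreasing_by
  · simp
  · have h1 : 1 ≤ ((w :: ws).takeWhile pvHeadUpper).length :=
      List.length_pos_of_ne_nil h
    simp only [List.length_drop, List.length_cons]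
    omega

def get_full_names_alt (text : String) : List String :=
  pvRuns (PySem.Str.split₀ text)

-- ===== PRECONDITION & SPEC =====
def Spec_get_full_names (text : String) (out : List String) : Prop := out = get_full_names_alt text
instance (text : String) (out : List String) : Decidable (Spec_get_full_names text out) := by unfold Spec_get_full_names; infer_instance

-- ===== CLAIM (what is proved, stated in full; the proofs are below) =====
def Claim_equal_get_full_names : Prop := ∀ (text : String), Dom_get_full_names text → Spec_get_full_names text (get_full_names text)

-- ===== LEMMAS AND PROOFS =====

-- recursive characterization of A's fold: pending run 'cur', remaining words
def pvOutA (cur : List String) : List String → List String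
  | [] => if cur.length ≠ 0 then [pvJoinName cur] else []
  | w :: ws =>
    if pvHeadUpper w then pvOutA (cur ++ [w]) ws
    else if cur.length ≠ 0 then pvJoinName cur :: pvOutA [] ws
    else pvOutA [] ws

theorem pvFoldA_eq (ws : List String) : ∀ (acc cur : List String),
    (let r := ws.foldl (fun (st : List String × List String) (word : String) =>
        if pvHeadUpper word then (st.1, st.2 ++ [word])
        else if st.2.length ≠ 0 then (st.1 ++ [pvJoinName st.2], ([] : List String))
        else st) (acc, cur)
     if r.2.length ≠ 0 then r.1 ++ [pvJoinName r.2] else r.1) = acc ++ pvOutA cur ws := by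
  induction ws with
  | nil =>
    intro acc cur
    simp only [List.foldl_nil, pvOutA]
    split <;> simp_all
  | cons w ws ih =>
    intro acc cur
    simp only [List.foldl_cons, pvOutA]
    by_cases hu : pvHeadUpper w
    · simp only [hu, if_true]
      exact ih acc (cur ++ [w])
    · by_cases hc : cur.length ≠ 0
      · simp only [hu, Bool.false_eq_true, if_false, hc, if_true, ne_eq,
          not_false_eq_true]
        rw [ih (acc ++ [pvJoinName cur]) []]
        simp
      · have hcur : cur = [] := by simpa using hc
        subst hcur
        simp only [hu, Bool.false_eq_true, if_false, List.length_nil, ne_eq,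
          not_true_eq_false]
        exact ih acc []

theorem pvOutA_eq_runs (ws : List String) : ∀ (cur : List String),
    (∀ w ∈ cur, pvHeadUpper w = true) → pvOutA cur ws = pvRuns (cur ++ ws) := by
  induction ws with
  | nil =>
    intro cur hcur
    simp only [pvOutA, List.append_nil]
    cases cur with
    | nil => simp [pvRuns]
    | cons c cs =>
      have htw : (c :: cs).takeWhile pvHeadUpper = c :: cs :=
        List.takeWhile_eq_self_iff.mpr hcur
      rw [pvRuns]
      simp only [htw]
      rw [dif_neg (by simp : (c :: cs) ≠ ([] : List String))]
      simp [pvRuns]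
  | cons w ws ih =>
    intro cur hcur
    simp only [pvOutA]
    by_cases hu : pvHeadUpper w
    · simp only [hu, if_true]
      rw [ih (cur ++ [w]) (by intro x hx; rcases List.mem_append.mp hx with h | h
                              · exact hcur x h
                              · simp at h; subst h; exact hu)]
      simp
    · simp only [hu, if_false, Bool.false_eq_true]
      have hnw : pvHeadUpper w = false := by simpa using hu
      cases cur with
      | nil =>
        simp only [List.length_nil, ne_eq, not_true_eq_false, if_false, List.nil_append]
        rw [ih [] (by simp)]
        rw [pvRuns]
        simp [hnw]
      | cons c cs =>
        simp only [List.length_cons, ne_eq, Nat.succ_ne_zero, not_false_eq_true, if_true]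
        rw [ih [] (by simp), List.nil_append]
        have htwself : (c :: cs).takeWhile pvHeadUpper = c :: cs :=
          List.takeWhile_eq_self_iff.mpr hcur
        have htw : ((c :: cs) ++ w :: ws).takeWhile pvHeadUpper = c :: cs := by
          rw [List.takeWhile_append, htwself]
          simp [hnw]
        rw [show ((c :: cs) ++ w :: ws) = c :: (cs ++ w :: ws) by simp, pvRuns]
        simp only [← List.cons_append, htw]
        have : (c :: cs) ≠ ([] : List String) := by simp
        rw [dif_neg this]
        have hdrop : ((c :: cs) ++ w :: ws).drop (c :: cs).length = w :: ws := by
          simp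
        simp only [List.cons_append] at hdrop ⊢
        rw [hdrop]
        rw [pvRuns]
        simp [hnw]

-- ===== VERDICT (by name: the statement is the Claim_ definition above) =====
theorem get_full_names_spec : Claim_equal_get_full_names := by
  intro text _
  unfold Spec_get_full_names get_full_names get_full_names_alt
  rw [pvFoldA_eq (PySem.Str.split₀ text) [] []]
  rw [pvOutA_eq_runs (PySem.Str.split₀ text) [] (by simp)]
  simp
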